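-- pv_equiv track=rewrite | github.com/ksh1004/codetree-TILs | 231109/나누고 빼면서 합하기/divide-and-subtract-and-add-up.py | func
-- ===== SOURCE A (Python) =====
-- def func(num, num_list):
--     sum_val = 0 # m번째 원소를 계속 더해 출력하는 값
--     idx_list = [] # m번째 원소를 저장하는 리스트
--     idx_list.append(num)
--     while(num != 1): # num이 1이 될 때까지 값을 구하기
--         if(num % 2 == 0): # 짝수면
--             num //= 2 # 나누기 2
--         else: # 홀수면
--             num -= 1 # 빼기 1
--         idx_list.append(num)
--     for i in range(len(idx_list)):
--         sum_val += num_list[idx_list[i] - 1] # sum_val에 더하기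
--     return sum_val
-- ===== SOURCE B (Python) =====
-- def func(num, num_list):
--     # Recursive formulation: contribution of the current num plus the rest of the chain.
--     if num == 1:
--         return num_list[0]
--     nxt = num // 2 if num % 2 == 0 else num - 1
--     return num_list[num - 1] + func(nxt, num_list)
-- ===== Notes on version B (the rewrite author's own statement) =====
-- stated objective: simpler
-- what changed: Replaces the two-pass structure (build idx_list with a while loop, then an index loop summing num_list over it) with a direct structural recursion on num that returns num_list[num-1] plus the recursive sum of the rest of the chain, with no intermediate list.
import Mathlib
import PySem

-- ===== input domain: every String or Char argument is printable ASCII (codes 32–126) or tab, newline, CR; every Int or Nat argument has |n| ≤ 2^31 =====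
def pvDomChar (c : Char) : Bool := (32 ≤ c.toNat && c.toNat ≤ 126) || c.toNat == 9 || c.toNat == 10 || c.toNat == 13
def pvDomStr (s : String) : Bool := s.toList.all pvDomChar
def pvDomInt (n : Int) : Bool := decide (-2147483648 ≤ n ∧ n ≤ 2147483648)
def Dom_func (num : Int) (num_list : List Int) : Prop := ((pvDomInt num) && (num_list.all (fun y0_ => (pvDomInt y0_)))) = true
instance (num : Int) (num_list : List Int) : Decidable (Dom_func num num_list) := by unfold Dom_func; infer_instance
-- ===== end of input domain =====

-- B replaces A's two passes (build idx_list, then sum over it) by one direct recursion on num; objective: simpler.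

-- ===== PORT A =====
-- the while loop of A: emits the successive values of num after each step, until num = 1.
-- Fuel bounds the iteration count (the Python loop terminates for num ≥ 1, which Pre_ guarantees;
-- each step decreases num by at least 1, so fuel = num.toNat suffices).
def buildIdx (fuel : Nat) (num : Int) : List Int :=
  match fuel with
  | 0 => []
  | f + 1 =>
    if num = 1 then []
    else
      let num' := if PySem.Int.mod num 2 = 0 then PySem.Int.floordiv num 2 else num - 1
      num' :: buildIdx f num'

def func (num : Int) (num_list : List Int) : Int :=
  let idx_list : List Int := num :: buildIdx num.toNat num
  idx_list.foldl (fun sum_val i => sum_val + (PySem.List.pyGet? num_list (i - 1)).getD 0) 0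

-- ===== PORT B =====
-- Source B's recursion, with the same fuel bound (Pre_ keeps num ≥ 1, where the Python recursion terminates).
def altGo (fuel : Nat) (num : Int) (num_list : List Int) : Int :=
  match fuel with
  | 0 => 0
  | f + 1 =>
    if num = 1 then (PySem.List.pyGet? num_list 0).getD 0
    else
      let nxt := if PySem.Int.mod num 2 = 0 then PySem.Int.floordiv num 2 else num - 1
      (PySem.List.pyGet? num_list (num - 1)).getD 0 + altGo f nxt num_list

def func_alt (num : Int) (num_list : List Int) : Int := altGo num.toNat num num_list

-- ===== PRECONDITION & SPEC =====
-- Pre_ is exactly where the Python A returns: for num < 1 the while loop never reaches 1 (diverges),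
-- and for num > len(num_list) the index num-1 raises IndexError.
def Pre_func (num : Int) (num_list : List Int) : Prop := 1 ≤ num ∧ num ≤ num_list.length
instance (num : Int) (num_list : List Int) : Decidable (Pre_func num num_list) := by unfold Pre_func; infer_instance
def pvWitness_func : Int × List Int := (5, [10, 20, 30, 40, 50])

def Spec_func (num : Int) (num_list : List Int) (out : Int) : Prop := out = func_alt num num_list
instance (num : Int) (num_list : List Int) (out : Int) : Decidable (Spec_func num num_list out) := by unfold Spec_func; infer_instance

-- ===== CLAIM =====
def Claim_equal_func : Prop := ∀ (num : Int) (num_list : List Int), Dom_func num num_list → Pre_func num num_list → Spec_func num num_list (func num num_list)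

-- ===== LEMMAS AND PROOFS =====

-- the per-element contribution
def pvG (num_list : List Int) (x : Int) : Int := (PySem.List.pyGet? num_list (x - 1)).getD 0

lemma pv_foldl_sum (num_list : List Int) (xs : List Int) (s : Int) :
    xs.foldl (fun sum_val i => sum_val + (PySem.List.pyGet? num_list (i - 1)).getD 0) s
      = s + (xs.map (pvG num_list)).sum := by
  induction xs generalizing s with
  | nil => simp
  | cons a t ih => simp [List.foldl, ih, pvG]; ring

lemma pv_step_bounds (num : Int) (h1 : 1 ≤ num) (hne : num ≠ 1) :
    1 ≤ (if PySem.Int.mod num 2 = 0 then PySem.Int.floordiv num 2 else num - 1)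
    ∧ (if PySem.Int.mod num 2 = 0 then PySem.Int.floordiv num 2 else num - 1) ≤ num - 1 := by
  have h2 : 2 ≤ num := by omega
  by_cases hm : PySem.Int.mod num 2 = 0
  · have hf : PySem.Int.floordiv num 2 = num / 2 :=
      PySem.Int.floordiv_eq_ediv_of_pos (by omega)
    rw [hf] at *
    simp only [hm, if_pos]
    omega
  · simp only [hm, if_false]
    omega

lemma pv_altGo_eq (num_list : List Int) (fuel : Nat) (num : Int)
    (h1 : 1 ≤ num) (hf : num.toNat ≤ fuel) :
    altGo fuel num num_list = pvG num_list num + ((buildIdx fuel num).map (pvG num_list)).sum := by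
  induction fuel generalizing num with
  | zero => omega
  | succ f ih =>
    by_cases hne : num = 1
    · subst hne
      simp [altGo, buildIdx, pvG]
    · obtain ⟨hl, hr⟩ := pv_step_bounds num h1 hne
      have hf' : (if PySem.Int.mod num 2 = 0 then PySem.Int.floordiv num 2 else num - 1).toNat ≤ f := by
        omega
      simp only [altGo, buildIdx, hne, if_false]
      rw [ih _ hl hf']
      simp [pvG]

theorem pv_main (num : Int) (num_list : List Int) (h1 : 1 ≤ num) :
    func num num_list = func_alt num num_list := by
  unfold func func_alt
  rw [pv_foldl_sum]
  rw [pv_altGo_eq num_list num.toNat num h1 (le_refl _)]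
  simp [pvG]

-- ===== VERDICT =====
theorem func_spec : Claim_equal_func := by
  intro num num_list _ hpre
  unfold Spec_func
  exact pv_main num num_list hpre.1
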